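-- pv_equiv track=rewrite | github.com/sroccaserra/aoc2022 | src/25.py | solve
-- ===== SOURCE A (Python) =====
-- def solve(lines):
--     s = 0
--     nss = [[CONV[c] for c in line] for line in lines]
--     for ns in nss:
--         temp = 0
--         for n in ns:
--             temp = temp * 5 + n
--         s += temp
--     return snafu(s)
--
-- def snafu(n):
--     result = ''
--     while n > 0:
--         digit = (n-3)%5-2
--         result = ICONV[digit] + result
--         n = (n+2)//5
--     return result
--
-- CONV = {'2': 2, '1': 1, '0': 0, '-': -1, '=': -2}
--
-- ICONV = {v: k for k, v in CONV.items()}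
-- ===== SOURCE B (Python) =====
-- def solve(lines):
--     digits = "=-012"
--     total = 0
--     for line in lines:
--         v = 0
--         p = 1
--         for c in reversed(line):
--             v += (digits.index(c) - 2) * p
--             p *= 5
--         total += v
--     out = []
--     n = total
--     while n > 0:
--         n, r = divmod(n + 2, 5)
--         out.append(digits[r])
--     return ''.join(reversed(out))
-- ===== Notes on version B (the rewrite author's own statement) =====
-- stated objective: alternative
-- what changed: Per-line values are computed as an explicit sum of digit*5^i over the reversed string with a running power (instead of Horner's left fold over a dict-converted digit list), digit values come from positions in the string "=-012" instead of dict lookups, and the SNAFU output is built least-significant-first into a list via divmod and joined reversed (instead of repeated string prepending).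
import Mathlib
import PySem

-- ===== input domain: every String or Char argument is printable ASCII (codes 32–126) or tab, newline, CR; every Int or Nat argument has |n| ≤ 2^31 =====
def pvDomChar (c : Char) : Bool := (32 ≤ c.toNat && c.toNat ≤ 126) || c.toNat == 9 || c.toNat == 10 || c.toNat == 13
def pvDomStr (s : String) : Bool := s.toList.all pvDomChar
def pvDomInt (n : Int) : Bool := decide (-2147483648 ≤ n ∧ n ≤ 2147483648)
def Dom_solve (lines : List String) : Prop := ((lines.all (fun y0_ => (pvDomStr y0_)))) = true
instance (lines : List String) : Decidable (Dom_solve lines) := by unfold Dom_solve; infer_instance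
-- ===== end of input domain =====

-- B sums each line as an explicit Σ digit·5^i over the reversed string with a running power
-- (instead of A's Horner fold over dict-converted digits) and emits the SNAFU result
-- least-significant-first into a list, joined reversed (instead of A's string prepending).
-- Python strings are represented as List Char internally (String.ofList at the end), as PySem prescribes.

-- ===== PORT A =====
def pvCONV : PySem.Dict Char Int :=
  PySem.Dict.ofList [('2', 2), ('1', 1), ('0', 0), ('-', -1), ('=', -2)]

def pvICONV : PySem.Dict Int String :=
  PySem.Dict.ofList [(2, "2"), (1, "1"), (0, "0"), (-1, "-"), (-2, "=")]

-- snafu's while loop; `result` is the growing string (as List Char).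
def snafuLoop (n : Int) (result : List Char) : List Char :=
  if 0 < n then
    snafuLoop (PySem.Int.floordiv (n + 2) 5)
      ((PySem.Dict.getD pvICONV (PySem.Int.mod (n - 3) 5 - 2) "").toList ++ result)
  else result
termination_by n.toNat
decreasing_by
  rw [PySem.Int.floordiv_eq_ediv_of_pos (by norm_num)]
  omega

-- CONV[c] raises KeyError on a char outside "210-="; such inputs are excluded by Pre_solve,
-- so the lookup is ported with default 0 (unclaimed outside Pre_).
def solve (lines : List String) : String :=
  let nss := lines.map (fun line => line.toList.map (fun c => PySem.Dict.getD pvCONV c 0))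
  let s := nss.foldl (fun s ns => s + ns.foldl (fun temp n => temp * 5 + n) 0) 0
  String.ofList (snafuLoop s [])

-- ===== PORT B =====
def pvDigits : String := "=-012"

-- B's inner loop over reversed(line) with state (v, p); digits.index(c) ported as Str.find
-- (B raises ValueError outside "210-=", excluded by Pre_solve; find returns -1 there, unclaimed).
def lineVal (line : String) : Int :=
  (line.toList.reverse.foldl
    (fun (vp : Int × Int) c =>
      (vp.1 + (PySem.Str.find pvDigits (String.ofList [c]) - 2) * vp.2, vp.2 * 5))
    (0, 1)).1

-- B's while loop: append digits[r] least-significant-first.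
def snafuAltLoop (n : Int) (out : List Char) : List Char :=
  if 0 < n then
    snafuAltLoop (PySem.Int.floordiv (n + 2) 5)
      (out ++ [(PySem.Str.pyGet? pvDigits (PySem.Int.mod (n + 2) 5)).getD ' '])
  else out
termination_by n.toNat
decreasing_by
  rw [PySem.Int.floordiv_eq_ediv_of_pos (by norm_num)]
  omega

def solve_alt (lines : List String) : String :=
  let total := lines.foldl (fun t line => t + lineVal line) 0
  String.ofList (snafuAltLoop total []).reverse

-- ===== PRECONDITION & SPEC =====
-- Pre_ excludes exactly the inputs with a character outside "210-=", on which A raises KeyError.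
def Pre_solve (lines : List String) : Prop :=
  (lines.all (fun line =>
    line.toList.all (fun c => (['2', '1', '0', '-', '='] : List Char).contains c))) = true
instance (lines : List String) : Decidable (Pre_solve lines) := by unfold Pre_solve; infer_instance

def pvWitness_solve : List String := ["1=-0-2", "2", ""]

def Spec_solve (lines : List String) (out : String) : Prop := out = solve_alt lines
instance (lines : List String) (out : String) : Decidable (Spec_solve lines out) := by
  unfold Spec_solve; infer_instance

-- ===== CLAIM (what is proved, stated in full; the proofs are below) =====
def Claim_equal_solve : Prop :=
  ∀ (lines : List String), Dom_solve lines → Pre_solve lines → Spec_solve lines (solve lines)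

-- ===== LEMMAS AND PROOFS =====

-- B's foldr form of the inner loop (foldl over reverse = foldr).
def pvF (l : List Char) : Int × Int :=
  l.foldr
    (fun c vp => (vp.1 + (PySem.Str.find pvDigits (String.ofList [c]) - 2) * vp.2, vp.2 * 5))
    (0, 1)

theorem lineVal_eq_pvF (line : String) : lineVal line = (pvF line.toList).1 := by
  simp [lineVal, pvF, List.foldl_reverse]

theorem pvF_snd (l : List Char) : (pvF l).2 = 5 ^ l.length := by
  induction l with
  | nil => simp [pvF]
  | cons c l ih => simp [pvF] at ih ⊢; rw [ih]; ring

-- On the valid digit chars, B's position-in-"=-012" value equals A's CONV lookup.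
set_option maxRecDepth 4096 in
theorem charVal_eq (c : Char)
    (hc : (['2', '1', '0', '-', '='] : List Char).contains c = true) :
    PySem.Str.find pvDigits (String.ofList [c]) - 2 = PySem.Dict.getD pvCONV c 0 := by
  simp only [List.contains_eq_mem, List.mem_cons, List.not_mem_nil, or_false,
    decide_eq_true_eq] at hc
  rcases hc with h | h | h | h | h <;> subst h <;> decide

-- Horner's fold over A's digit values equals acc·5^len + B's place-value sum.
theorem horner_eq (l : List Char)
    (hl : ∀ c ∈ l, (['2', '1', '0', '-', '='] : List Char).contains c = true) :
    ∀ acc : Int,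
      l.foldl (fun t c => t * 5 + PySem.Dict.getD pvCONV c 0) acc
        = acc * 5 ^ l.length + (pvF l).1 := by
  induction l with
  | nil => intro acc; simp [pvF]
  | cons c l ih =>
    intro acc
    have hc := hl c (by simp)
    have ih' := ih (fun d hd => hl d (by simp [hd]))
    simp only [List.foldl_cons, ih', pvF, List.foldr_cons]
    have hs : (pvF l).2 = 5 ^ l.length := pvF_snd l
    simp only [pvF] at hs
    rw [hs, ← charVal_eq c hc]
    simp only [List.length_cons]
    ring

-- The SNAFU digit A prepends equals the char B appends, for every n > 0.
theorem digit_char (m : Int) (h0 : 0 ≤ m) (h5 : m < 5) :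
    (PySem.Dict.getD pvICONV (m - 2) "").toList
      = [(PySem.Str.pyGet? pvDigits m).getD ' '] := by
  interval_cases m <;> decide

theorem mod_shift (n : Int) :
    PySem.Int.mod (n + 2) 5 = PySem.Int.mod (n - 3) 5 := by
  rw [PySem.Int.mod_eq_emod_of_pos (by norm_num), PySem.Int.mod_eq_emod_of_pos (by norm_num)]
  omega

-- B's loop with a non-empty accumulator.
theorem snafuAltLoop_acc (n : Int) : ∀ out : List Char,
    snafuAltLoop n out = out ++ snafuAltLoop n [] := by
  by_cases h : 0 < n
  · have ih := snafuAltLoop_acc (PySem.Int.floordiv (n + 2) 5)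
    intro out
    conv_lhs => rw [snafuAltLoop]
    conv_rhs => rw [snafuAltLoop]
    rw [if_pos h, if_pos h, List.nil_append, ih,
      ih [(PySem.Str.pyGet? pvDigits (PySem.Int.mod (n + 2) 5)).getD ' ']]
    simp
  · intro out
    conv_lhs => rw [snafuAltLoop]
    conv_rhs => rw [snafuAltLoop]
    rw [if_neg h, if_neg h]
    simp
termination_by n.toNat
decreasing_by
  rw [PySem.Int.floordiv_eq_ediv_of_pos (by norm_num)]
  omega

-- A's prepending loop builds exactly the reverse of B's appending loop.
theorem snafuLoop_eq (n : Int) : ∀ res : List Char,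
    snafuLoop n res = (snafuAltLoop n []).reverse ++ res := by
  by_cases h : 0 < n
  · have ih := snafuLoop_eq (PySem.Int.floordiv (n + 2) 5)
    intro res
    have hm0 : 0 ≤ PySem.Int.mod (n - 3) 5 := PySem.Int.mod_nonneg _ (by norm_num)
    have hm5 : PySem.Int.mod (n - 3) 5 < 5 := PySem.Int.mod_lt _ (by norm_num)
    conv_lhs => rw [snafuLoop]
    conv_rhs => rw [snafuAltLoop]
    rw [if_pos h, if_pos h, List.nil_append, mod_shift, digit_char _ hm0 hm5, ih,
      snafuAltLoop_acc (PySem.Int.floordiv (n + 2) 5)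
        [(PySem.Str.pyGet? pvDigits (PySem.Int.mod (n - 3) 5)).getD ' ']]
    simp
  · intro res
    conv_lhs => rw [snafuLoop]
    conv_rhs => rw [snafuAltLoop]
    rw [if_neg h, if_neg h]
    simp
termination_by n.toNat
decreasing_by
  rw [PySem.Int.floordiv_eq_ediv_of_pos (by norm_num)]
  omega

-- ===== VERDICT (by name: the statement is the Claim_ definition above) =====
theorem solve_spec : Claim_equal_solve := by
  intro lines _ hpre
  unfold Spec_solve solve solve_alt
  have hsum :
      (lines.map (fun line => line.toList.map (fun c => PySem.Dict.getD pvCONV c 0))).foldl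
          (fun s ns => s + ns.foldl (fun temp n => temp * 5 + n) 0) 0
        = lines.foldl (fun t line => t + lineVal line) 0 := by
    rw [List.foldl_map]
    apply PySem.List.foldl_congr_mem
    intro acc line hline
    unfold Pre_solve at hpre
    simp only [List.all_eq_true] at hpre
    have hl := hpre line hline
    rw [List.foldl_map, horner_eq line.toList hl 0, lineVal_eq_pvF]
    ring
  simp only [hsum, snafuLoop_eq, List.append_nil]
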